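-- pv_equiv track=rewrite | github.com/wasdw1012/applet- | incremental_id_hunter.py | _identify_critical_fields
-- ===== SOURCE A (Python) =====
-- from typing import List, Dict, Set, Optional, Any, Tuple, Union
--
-- def _identify_critical_fields(forms: List[Dict[str, Any]]) -> Dict[str, List]:
--     """识别关键字段"""
--     critical_fields = {
--         'id_fields': [],
--         'personal_info': [],
--         'medical_info': [],
--         'security_fields': []
--     }
--
--     for form in forms:
--         for field in form.get('fields', []):
--             category = field.get('field_category', 'unknown')
--             field_name = field.get('name', '')
--
--             if category == 'id_number':
--                 critical_fields['id_fields'].append(field_name)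
--             elif category in ['name', 'phone', 'email', 'address']:
--                 critical_fields['personal_info'].append(field_name)
--             elif category == 'medical':
--                 critical_fields['medical_info'].append(field_name)
--             elif category == 'security':
--                 critical_fields['security_fields'].append(field_name)
--
--     return critical_fields
-- ===== SOURCE B (Python) =====
-- def _identify_critical_fields(forms):
--     """识别关键字段 — flat pair list, then one filter per bucket."""
--     pairs = [(field.get('field_category', 'unknown'), field.get('name', ''))
--              for form in forms
--              for field in form.get('fields', [])]
--     return {
--         'id_fields': [n for c, n in pairs if c == 'id_number'],
--         'personal_info': [n for c, n in pairs if c in ('name', 'phone', 'email', 'address')],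
--         'medical_info': [n for c, n in pairs if c == 'medical'],
--         'security_fields': [n for c, n in pairs if c == 'security'],
--     }
-- ===== Notes on version B (the rewrite author's own statement) =====
-- stated objective: idiomatic
-- what changed: Replaces the stateful nested loop with an if-elif chain mutating four accumulator lists by a flat (category, name) pair list built once and four independent filter comprehensions, one per bucket.
import Mathlib
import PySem

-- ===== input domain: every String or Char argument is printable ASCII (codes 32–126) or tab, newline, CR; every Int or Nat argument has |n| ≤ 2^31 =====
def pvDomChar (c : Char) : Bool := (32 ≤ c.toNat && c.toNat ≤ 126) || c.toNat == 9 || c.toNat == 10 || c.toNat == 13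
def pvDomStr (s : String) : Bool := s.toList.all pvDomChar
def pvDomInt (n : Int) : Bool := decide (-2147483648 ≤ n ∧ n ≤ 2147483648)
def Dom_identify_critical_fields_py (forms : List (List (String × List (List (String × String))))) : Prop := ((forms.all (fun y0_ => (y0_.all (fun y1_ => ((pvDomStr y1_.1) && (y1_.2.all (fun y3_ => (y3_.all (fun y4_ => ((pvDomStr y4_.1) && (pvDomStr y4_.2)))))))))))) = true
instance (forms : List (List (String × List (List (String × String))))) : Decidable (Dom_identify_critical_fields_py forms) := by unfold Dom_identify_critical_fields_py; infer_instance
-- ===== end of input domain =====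

-- ===== PORT A =====
-- B differs from A by decomposition: A threads four accumulators through one nested loop;
-- B builds a flat (category, name) list once and filters it per bucket. Same O(n) cost.

-- shared primitive: Python dict.get(k, dflt) on an association list (first match)
def pvGetD {v : Type} (d : List (String × v)) (k : String) (dflt : v) : v :=
  match d.find? (fun p => p.1 == k) with
  | some p => p.2
  | none => dflt

def identify_critical_fields_py (forms : List (List (String × List (List (String × String))))) : List (String × List String) :=
  let st := forms.foldl (fun st form =>
    (pvGetD form "fields" []).foldl (fun st field =>
      let category := pvGetD field "field_category" "unknown"
      let field_name := pvGetD field "name" ""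
      if category == "id_number" then
        (st.1 ++ [field_name], st.2.1, st.2.2.1, st.2.2.2)
      else if ["name", "phone", "email", "address"].contains category then
        (st.1, st.2.1 ++ [field_name], st.2.2.1, st.2.2.2)
      else if category == "medical" then
        (st.1, st.2.1, st.2.2.1 ++ [field_name], st.2.2.2)
      else if category == "security" then
        (st.1, st.2.1, st.2.2.1, st.2.2.2 ++ [field_name])
      else st) st)
    (([], [], [], []) : List String × List String × List String × List String)
  [("id_fields", st.1), ("personal_info", st.2.1),
   ("medical_info", st.2.2.1), ("security_fields", st.2.2.2)]

-- ===== PORT B =====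
def identify_critical_fields_py_alt (forms : List (List (String × List (List (String × String))))) : List (String × List String) :=
  let pairs := forms.flatMap (fun form =>
    (pvGetD form "fields" []).map (fun field =>
      (pvGetD field "field_category" "unknown", pvGetD field "name" "")))
  [("id_fields", (pairs.filter (fun p => p.1 == "id_number")).map (·.2)),
   ("personal_info", (pairs.filter (fun p => ["name", "phone", "email", "address"].contains p.1)).map (·.2)),
   ("medical_info", (pairs.filter (fun p => p.1 == "medical")).map (·.2)),
   ("security_fields", (pairs.filter (fun p => p.1 == "security")).map (·.2))]

-- ===== PRECONDITION & SPEC =====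
def Spec_identify_critical_fields_py (forms : List (List (String × List (List (String × String))))) (out : List (String × List String)) : Prop := out = identify_critical_fields_py_alt forms
instance (forms : List (List (String × List (List (String × String))))) (out : List (String × List String)) : Decidable (Spec_identify_critical_fields_py forms out) := by unfold Spec_identify_critical_fields_py; infer_instance

-- ===== CLAIM (what is proved, stated in full; the proofs are below) =====
def Claim_equal_identify_critical_fields_py : Prop := ∀ (forms : List (List (String × List (List (String × String))))), Dom_identify_critical_fields_py forms → Spec_identify_critical_fields_py forms (identify_critical_fields_py forms)

-- ===== LEMMAS AND PROOFS =====
def pvState : Type := List String × List String × List String × List String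

def pvStep (st : pvState) (p : String × String) : pvState :=
  if p.1 == "id_number" then (st.1 ++ [p.2], st.2.1, st.2.2.1, st.2.2.2)
  else if ["name", "phone", "email", "address"].contains p.1 then (st.1, st.2.1 ++ [p.2], st.2.2.1, st.2.2.2)
  else if p.1 == "medical" then (st.1, st.2.1, st.2.2.1 ++ [p.2], st.2.2.2)
  else if p.1 == "security" then (st.1, st.2.1, st.2.2.1, st.2.2.2 ++ [p.2])
  else st

def pvBuckets (ps : List (String × String)) : pvState :=
  ((ps.filter (fun p => p.1 == "id_number")).map (·.2),
   (ps.filter (fun p => ["name", "phone", "email", "address"].contains p.1)).map (·.2),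
   (ps.filter (fun p => p.1 == "medical")).map (·.2),
   (ps.filter (fun p => p.1 == "security")).map (·.2))

lemma pvStep_foldl (ps : List (String × String)) (st : pvState) :
    ps.foldl pvStep st =
      (st.1 ++ (pvBuckets ps).1, st.2.1 ++ (pvBuckets ps).2.1,
       st.2.2.1 ++ (pvBuckets ps).2.2.1, st.2.2.2 ++ (pvBuckets ps).2.2.2) := by
  induction ps generalizing st with
  | nil => simp [pvBuckets]
  | cons p ps ih =>
    simp only [List.foldl_cons, ih, pvStep, pvBuckets, List.filter_cons]
    by_cases h1 : p.1 == "id_number" <;>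
      by_cases h2 : ["name", "phone", "email", "address"].contains p.1 <;>
        by_cases h3 : p.1 == "medical" <;>
          by_cases h4 : p.1 == "security" <;>
            simp_all [pvBuckets]

lemma pvInner (fields : List (List (String × String))) (st : pvState) :
    fields.foldl (fun st field =>
      let category := pvGetD field "field_category" "unknown"
      let field_name := pvGetD field "name" ""
      if category == "id_number" then
        (st.1 ++ [field_name], st.2.1, st.2.2.1, st.2.2.2)
      else if ["name", "phone", "email", "address"].contains category then
        (st.1, st.2.1 ++ [field_name], st.2.2.1, st.2.2.2)
      else if category == "medical" then
        (st.1, st.2.1, st.2.2.1 ++ [field_name], st.2.2.2)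
      else if category == "security" then
        (st.1, st.2.1, st.2.2.1, st.2.2.2 ++ [field_name])
      else st) st =
    (fields.map (fun field =>
      (pvGetD field "field_category" "unknown", pvGetD field "name" ""))).foldl pvStep st := by
  induction fields generalizing st with
  | nil => rfl
  | cons f fs ih => simp only [List.foldl_cons, List.map_cons]; rw [ih]; rfl

lemma pvFoldl_pairs (forms : List (List (String × List (List (String × String)))))
    (st : pvState) :
    forms.foldl (fun st form =>
      (pvGetD form "fields" []).foldl (fun st field =>
        let category := pvGetD field "field_category" "unknown"
        let field_name := pvGetD field "name" ""
        if category == "id_number" then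
          (st.1 ++ [field_name], st.2.1, st.2.2.1, st.2.2.2)
        else if ["name", "phone", "email", "address"].contains category then
          (st.1, st.2.1 ++ [field_name], st.2.2.1, st.2.2.2)
        else if category == "medical" then
          (st.1, st.2.1, st.2.2.1 ++ [field_name], st.2.2.2)
        else if category == "security" then
          (st.1, st.2.1, st.2.2.1, st.2.2.2 ++ [field_name])
        else st) st) st =
    (forms.flatMap (fun form =>
      (pvGetD form "fields" []).map (fun field =>
        (pvGetD field "field_category" "unknown", pvGetD field "name" "")))).foldl pvStep st := by
  induction forms generalizing st with
  | nil => rfl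
  | cons form forms ih =>
    simp only [List.foldl_cons, List.flatMap_cons, List.foldl_append, ih]
    rw [pvInner]

-- ===== VERDICT (by name: the statement is the Claim_ definition above) =====
theorem identify_critical_fields_py_spec : Claim_equal_identify_critical_fields_py := by
  intro forms _
  unfold Spec_identify_critical_fields_py
  unfold identify_critical_fields_py identify_critical_fields_py_alt
  rw [pvFoldl_pairs, pvStep_foldl]
  simp [pvBuckets]
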